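-- pv_equiv track=rewrite | github.com/rschaeff/dpam_c2 | dpam/steps/step12_disorder.py | find_disordered_regions
-- ===== SOURCE A (Python) =====
-- from typing import Set, Dict, List
--
-- def find_disordered_regions(
--     length: int,
--     res2contacts: Dict[int, List[int]],
--     insses: Set[int],
--     hit_resids: Set[int]
-- ) -> Set[int]:
--     """
--     Find disordered regions using sliding window.
--
--     Window criteria (v1.0/dpam_automatic - 10 residues):
--     - Total inter-SSE contacts <= 30
--     - Hit residues (in good domains) <= 5
--
--     Args:
--         length: Protein length
--         res2contacts: Inter-SSE contacts per residue
--         insses: Residues in SSEs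
--         hit_resids: Residues in good domains
--
--     Returns:
--         Set of disordered residue IDs
--     """
--     diso_resids = set()
--
--     for start in range(1, length - 9):
--         total_contact = 0
--         hitres_count = 0
--
--         for res in range(start, start + 10):
--             # Count hit residues
--             if res in hit_resids:
--                 hitres_count += 1
--
--             # Count contacts for residues in SSEs
--             if res in insses:
--                 if res in res2contacts:
--                     total_contact += len(res2contacts[res])
--
--         # Apply criteria (v1.0: contacts <= 30, hits <= 5)
--         if total_contact <= 30 and hitres_count <= 5:
--             for res in range(start, start + 10):
--                 diso_resids.add(res)
--
--     return diso_resids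
-- ===== SOURCE B (Python) =====
-- def find_disordered_regions(
--     length,
--     res2contacts,
--     insses,
--     hit_resids
-- ):
--     """Prefix-sum re-implementation: window totals are read off as prefix
--     differences instead of rescanning a 10-residue inner loop."""
--     diso_resids = set()
--     # hp[i] / cp[i] = hit count / contact total over residues 1..i
--     hp = [0]
--     cp = [0]
--     h = 0
--     c = 0
--     for r in range(1, length):
--         if r in hit_resids:
--             h += 1
--         if r in insses and r in res2contacts:
--             c += len(res2contacts[r])
--         hp.append(h)
--         cp.append(c)
--     for start in range(1, length - 9):
--         if cp[start + 9] - cp[start - 1] <= 30 and hp[start + 9] - hp[start - 1] <= 5: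
--             diso_resids.update(range(start, start + 10))
--     return diso_resids
-- ===== Notes on version B (the rewrite author's own statement) =====
-- stated objective: alternative
-- what changed: Replaces the rescanned 10-residue inner loop per window with prefix-sum tables of hit counts and contact totals built in one pass, each window's totals then read as prefix differences; measured runtime is about the same since building the output set dominates.
import Mathlib
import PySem

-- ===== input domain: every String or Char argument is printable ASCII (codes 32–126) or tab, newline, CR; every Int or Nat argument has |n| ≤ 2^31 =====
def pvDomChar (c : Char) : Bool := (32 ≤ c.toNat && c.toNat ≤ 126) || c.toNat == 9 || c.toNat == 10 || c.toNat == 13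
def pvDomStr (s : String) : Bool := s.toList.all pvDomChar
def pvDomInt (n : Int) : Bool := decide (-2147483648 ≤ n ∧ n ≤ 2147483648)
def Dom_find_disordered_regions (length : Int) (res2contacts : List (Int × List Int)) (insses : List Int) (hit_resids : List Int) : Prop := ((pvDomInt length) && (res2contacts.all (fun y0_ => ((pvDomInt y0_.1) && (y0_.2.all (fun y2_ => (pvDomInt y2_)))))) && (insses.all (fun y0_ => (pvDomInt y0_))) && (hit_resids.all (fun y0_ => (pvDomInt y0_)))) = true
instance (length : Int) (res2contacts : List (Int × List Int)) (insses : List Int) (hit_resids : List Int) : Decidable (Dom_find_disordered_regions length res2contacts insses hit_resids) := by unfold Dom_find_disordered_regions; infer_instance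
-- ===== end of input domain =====

-- B replaces A's rescanned 10-residue inner loop by one prefix-sum pass, reading each
-- window's totals as prefix differences; equal output proved on all inputs.

-- ===== PORT A =====
def find_disordered_regions (length : Int) (res2contacts : List (Int × List Int)) (insses : List Int) (hit_resids : List Int) : List Int :=
  (PySem.List.pyRange 1 (length - 9) 1).foldl (fun diso start =>
    let tchc :=
      (PySem.List.pyRange start (start + 10) 1).foldl (fun (acc : Int × Int) res =>
        -- if res in hit_resids: hitres_count += 1
        let acc := if hit_resids.contains res then (acc.1, acc.2 + 1) else acc
        -- if res in insses: if res in res2contacts: total_contact += len(res2contacts[res])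
        if insses.contains res then
          match (PySem.Dict.mk res2contacts).get? res with
          | some lst => (acc.1 + (lst.length : Int), acc.2)
          | none => acc
        else acc) ((0, 0) : Int × Int)
    if tchc.1 ≤ 30 ∧ tchc.2 ≤ 5 then
      (PySem.List.pyRange start (start + 10) 1).foldl (fun s res => PySem.Set.add s res) diso
    else diso) PySem.Set.empty

-- ===== PORT B =====
-- state of B's prefix pass: (hp, cp, h, c)
def find_disordered_regions_alt (length : Int) (res2contacts : List (Int × List Int)) (insses : List Int) (hit_resids : List Int) : List Int :=
  let st :=
    (PySem.List.pyRange 1 length 1).foldl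
      (fun (st : List Int × List Int × Int × Int) r =>
        let h := if hit_resids.contains r then st.2.2.1 + 1 else st.2.2.1
        let c := if insses.contains r && (PySem.Dict.mk res2contacts).contains r then
                   st.2.2.2 + (((PySem.Dict.mk res2contacts).getD r []).length : Int)
                 else st.2.2.2
        (st.1 ++ [h], st.2.1 ++ [c], h, c))
      (([0] : List Int), ([0] : List Int), (0 : Int), (0 : Int))
  let hp := st.1
  let cp := st.2.1
  (PySem.List.pyRange 1 (length - 9) 1).foldl (fun diso start =>
    -- indices start+9 and start-1 are always in range here; the 0 default is never used
    if PySem.List.pyGetD cp (start + 9) 0 - PySem.List.pyGetD cp (start - 1) 0 ≤ 30 ∧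
       PySem.List.pyGetD hp (start + 9) 0 - PySem.List.pyGetD hp (start - 1) 0 ≤ 5 then
      PySem.Set.update diso (PySem.List.pyRange start (start + 10) 1)
    else diso) PySem.Set.empty

-- ===== PRECONDITION & SPEC =====
def Spec_find_disordered_regions (length : Int) (res2contacts : List (Int × List Int)) (insses : List Int) (hit_resids : List Int) (out : List Int) : Prop := out = find_disordered_regions_alt length res2contacts insses hit_resids
instance (length : Int) (res2contacts : List (Int × List Int)) (insses : List Int) (hit_resids : List Int) (out : List Int) : Decidable (Spec_find_disordered_regions length res2contacts insses hit_resids out) := by unfold Spec_find_disordered_regions; infer_instance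

-- ===== CLAIM (what is proved, stated in full; the proofs are below) =====
def Claim_equal_find_disordered_regions : Prop := ∀ (length : Int) (res2contacts : List (Int × List Int)) (insses : List Int) (hit_resids : List Int), Dom_find_disordered_regions length res2contacts insses hit_resids → Spec_find_disordered_regions length res2contacts insses hit_resids (find_disordered_regions length res2contacts insses hit_resids)

-- ===== LEMMAS AND PROOFS =====

-- sum of f over residues 1 .. r-1 (the prefix value stored at index r-1)
def pvSum (f : Int → Int) (r : Int) : Int := ((PySem.List.pyRange 1 r 1).map f).sum

lemma pvSum_succ (f : Int → Int) (r : Int) (h : 1 ≤ r) :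
    pvSum f (r + 1) = pvSum f r + f r := by
  unfold pvSum
  rw [PySem.List.pyRange_one_succ_right h]
  simp

lemma pvSum_window (f : Int → Int) (a b : Int) (h1 : 1 ≤ a) (h2 : a ≤ b) :
    pvSum f b - pvSum f a = ((PySem.List.pyRange a b 1).map f).sum := by
  unfold pvSum
  rw [PySem.List.pyRange_one_append 1 a b h1 h2]
  simp

-- the prefix pass over 1 .. n produces the two prefix tables and running totals
lemma prefix_fold (f g : Int → Int) (n : Nat) :
    (PySem.List.pyRange 1 (1 + (n : Int)) 1).foldl
      (fun (st : List Int × List Int × Int × Int) r =>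
        (st.1 ++ [st.2.2.1 + f r], st.2.1 ++ [st.2.2.2 + g r], st.2.2.1 + f r, st.2.2.2 + g r))
      (([0] : List Int), ([0] : List Int), (0 : Int), (0 : Int))
    = ((PySem.List.pyRange 0 (1 + (n : Int)) 1).map (fun i => pvSum f (i + 1)),
       (PySem.List.pyRange 0 (1 + (n : Int)) 1).map (fun i => pvSum g (i + 1)),
       pvSum f (1 + (n : Int)), pvSum g (1 + (n : Int))) := by
  induction n with
  | zero =>
      have h0 : (1 : Int) + ((0 : Nat) : Int) = 1 := by norm_num
      rw [h0, (by decide : PySem.List.pyRange 1 1 1 = []),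
          (by decide : PySem.List.pyRange 0 1 1 = [0])]
      simp [pvSum, (by decide : PySem.List.pyRange 1 1 1 = [])]
  | succ m ih =>
      have h1 : (1 : Int) + ((m + 1 : Nat) : Int) = (1 + (m : Int)) + 1 := by push_cast; ring
      rw [h1, PySem.List.pyRange_one_succ_right (by omega : (1:Int) ≤ 1 + (m:Int)),
          PySem.List.pyRange_one_succ_right (by omega : (0:Int) ≤ 1 + (m:Int)),
          List.foldl_append, ih]
      simp only [List.foldl_cons, List.foldl_nil, List.map_append, List.map_cons, List.map_nil]
      rw [pvSum_succ f _ (by omega), pvSum_succ g _ (by omega)]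

-- A's inner window scan computes the pair (contact sum, hit count) over the window
lemma inner_scan (res2contacts : List (Int × List Int)) (insses hit_resids : List Int)
    (l : List Int) (a b : Int) :
    l.foldl (fun (acc : Int × Int) res =>
        let acc := if hit_resids.contains res then (acc.1, acc.2 + 1) else acc
        if insses.contains res then
          match (PySem.Dict.mk res2contacts).get? res with
          | some lst => (acc.1 + (lst.length : Int), acc.2)
          | none => acc
        else acc) ((a, b) : Int × Int)
    = (a + (l.map (fun r => if insses.contains r && (PySem.Dict.mk res2contacts).contains r then
                     (((PySem.Dict.mk res2contacts).getD r []).length : Int) else 0)).sum,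
       b + (l.map (fun r => if hit_resids.contains r then (1 : Int) else 0)).sum) := by
  induction l generalizing a b with
  | nil => simp
  | cons x t ih =>
      rw [List.foldl_cons]
      have hstep : (let acc := if hit_resids.contains x then (((a, b) : Int × Int).1, ((a, b) : Int × Int).2 + 1) else ((a, b) : Int × Int)
          if insses.contains x then
            match (PySem.Dict.mk res2contacts).get? x with
            | some lst => (acc.1 + (lst.length : Int), acc.2)
            | none => acc
          else acc)
          = ((a + (if insses.contains x && (PySem.Dict.mk res2contacts).contains x then
                    (((PySem.Dict.mk res2contacts).getD x []).length : Int) else 0),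
             b + (if hit_resids.contains x then (1 : Int) else 0)) : Int × Int) := by
        rcases hg : (PySem.Dict.mk res2contacts).get? x with _ | lst
        · have hc : (PySem.Dict.mk res2contacts).contains x = false := by
            rw [PySem.Dict.contains_eq_isSome_get?, hg]; rfl
          cases hh : hit_resids.contains x <;> cases hi : insses.contains x <;>
            simp [hc]
        · have hc : (PySem.Dict.mk res2contacts).contains x = true := by
            rw [PySem.Dict.contains_eq_isSome_get?, hg]; rfl
          have hd : (PySem.Dict.mk res2contacts).getD x [] = lst :=
            PySem.Dict.getD_of_get?_eq_some _ _ hg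
          cases hh : hit_resids.contains x <;> cases hi : insses.contains x <;>
            simp [hc, hd]
      rw [hstep, ih]
      simp only [List.map_cons, List.sum_cons, Prod.mk.injEq]
      constructor <;> ring

theorem find_disordered_regions_eq_alt :
    ∀ (length : Int) (res2contacts : List (Int × List Int)) (insses : List Int) (hit_resids : List Int),
      find_disordered_regions length res2contacts insses hit_resids
        = find_disordered_regions_alt length res2contacts insses hit_resids := by
  intro length res2contacts insses hit_resids
  by_cases hlen : length ≤ 10
  · -- both outer loops are empty
    rw [find_disordered_regions, find_disordered_regions_alt]
    rw [PySem.List.pyRange_one_eq_nil (by omega : length - 9 ≤ 1)]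
    simp
  · -- length ≥ 11
    replace hlen : 10 < length := by omega
    set f : Int → Int := fun r => if hit_resids.contains r then (1 : Int) else 0 with hf
    set g : Int → Int := fun r =>
      if insses.contains r && (PySem.Dict.mk res2contacts).contains r then
        (((PySem.Dict.mk res2contacts).getD r []).length : Int) else 0 with hg
    obtain ⟨n, hn⟩ : ∃ n : Nat, length = 1 + (n : Int) := ⟨(length - 1).toNat, by omega⟩
    rw [find_disordered_regions, find_disordered_regions_alt]
    have hstep : (fun (st : List Int × List Int × Int × Int) r =>
        let h := if hit_resids.contains r then st.2.2.1 + 1 else st.2.2.1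
        let c := if insses.contains r && (PySem.Dict.mk res2contacts).contains r then
                   st.2.2.2 + (((PySem.Dict.mk res2contacts).getD r []).length : Int)
                 else st.2.2.2
        (st.1 ++ [h], st.2.1 ++ [c], h, c))
        = (fun (st : List Int × List Int × Int × Int) r =>
        (st.1 ++ [st.2.2.1 + f r], st.2.1 ++ [st.2.2.2 + g r], st.2.2.1 + f r, st.2.2.2 + g r)) := by
      funext st r
      cases hh : hit_resids.contains r <;>
        cases hi : insses.contains r && (PySem.Dict.mk res2contacts).contains r <;>
        simp only [hf, hg, hh, hi, if_true, if_false, Bool.false_eq_true,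
          add_zero]
    rw [hn, hstep, prefix_fold f g n]
    refine PySem.List.foldl_congr_mem _ _ _ _ ?_
    intro diso start hmem
    rw [PySem.List.mem_pyRange_one] at hmem
    obtain ⟨hs1, hs2⟩ := hmem
    rw [inner_scan]
    rw [PySem.List.pyGetD_map_pyRange_of_nonneg _ _ _ _ (by omega) (by omega),
        PySem.List.pyGetD_map_pyRange_of_nonneg _ _ _ _ (by omega) (by omega),
        PySem.List.pyGetD_map_pyRange_of_nonneg _ _ _ _ (by omega) (by omega),
        PySem.List.pyGetD_map_pyRange_of_nonneg _ _ _ _ (by omega) (by omega)]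
    have e1 : start - 1 + 1 = start := by ring
    have e9 : start + 9 + 1 = start + 10 := by ring
    rw [e1, e9]
    rw [pvSum_window g start (start + 10) hs1 (by omega),
        pvSum_window f start (start + 10) hs1 (by omega)]
    simp only [zero_add]
    rfl

-- ===== VERDICT (by name: the statement is the Claim_ definition above) =====
theorem find_disordered_regions_spec : Claim_equal_find_disordered_regions := by
  intro length res2contacts insses hit_resids _
  exact find_disordered_regions_eq_alt length res2contacts insses hit_resids
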